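-- pv_equiv track=rewrite | github.com/bilginyuksel/AlgorithmSolutions | hackerrank/the-great-xor.py | greatXor
-- ===== SOURCE A (Python) =====
-- def greatXor(num):
--     power = 0
--     result = 0
--     while num != 0:
--         if num & 1 == 0:
--             result += 2 ** power
--         power += 1
--         num >>= 1
--     return result
-- ===== SOURCE B (Python) =====
-- def greatXor(num):
--     # Closed form: the loop flips every bit of num below its bit length,
--     # i.e. it computes the complement of num within an all-ones mask of
--     # num.bit_length() bits, which equals mask - num.
--     return (1 << num.bit_length()) - 1 - num
-- ===== Notes on version B (the rewrite author's own statement) =====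
-- stated objective: simpler
-- what changed: Replaces the per-bit while loop accumulating 2**power for each zero bit by the closed form ((1 << num.bit_length()) - 1) - num, the bit-complement-within-bit-length identity.
-- outside the precondition, e.g. on greatXor(-3): A does not finish within the time limit, B returns 6
import Mathlib
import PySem

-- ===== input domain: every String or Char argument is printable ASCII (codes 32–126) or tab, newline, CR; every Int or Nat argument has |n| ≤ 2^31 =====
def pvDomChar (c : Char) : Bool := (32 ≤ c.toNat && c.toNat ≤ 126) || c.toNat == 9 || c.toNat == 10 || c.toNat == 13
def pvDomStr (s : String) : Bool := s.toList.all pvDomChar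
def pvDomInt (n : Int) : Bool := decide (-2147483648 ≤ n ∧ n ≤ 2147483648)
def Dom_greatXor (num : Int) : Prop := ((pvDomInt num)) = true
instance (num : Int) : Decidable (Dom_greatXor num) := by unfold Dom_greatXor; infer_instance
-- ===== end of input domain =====

-- B replaces A's per-bit accumulation loop with the closed form ((1 << bit_length) - 1) - num; equivalence proved for 0 ≤ num (A never terminates on negative input).


-- ===== PORT A =====
-- the while loop; on num < 0 Python A never terminates (Pre_ excludes that), so the
-- 'num < 0' branch just stops the recursion — it is unreachable under Pre_greatXor
def greatXorLoop (num : Int) (power : Nat) (result : Int) : Int :=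
  if num = 0 then result
  else if num < 0 then result
  else greatXorLoop (num >>> (1:Nat)) (power + 1)
        (if PySem.Int.band num 1 = 0 then result + 2 ^ power else result)
termination_by num.toNat
decreasing_by
  rename_i h0 hneg
  rw [Int.shiftRight_eq_div_pow]
  omega

def greatXor (num : Int) : Int := greatXorLoop num 0 0

-- ===== PORT B =====
def greatXor_alt (num : Int) : Int := ((1:Int) <<< PySem.Int.bitLength num) - 1 - num

-- ===== PRECONDITION & SPEC =====
-- Pre_ excludes num < 0, on which Python A's while loop never terminates (num >>= 1 stalls at -1)
def Pre_greatXor (num : Int) : Prop := 0 ≤ num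
instance (num : Int) : Decidable (Pre_greatXor num) := by unfold Pre_greatXor; infer_instance
def pvWitness_greatXor : Int := (10)
def Spec_greatXor (num : Int) (out : Int) : Prop := out = greatXor_alt num
instance (num : Int) (out : Int) : Decidable (Spec_greatXor num out) := by unfold Spec_greatXor; infer_instance

-- ===== CLAIM (what is proved, stated in full; the proofs are below) =====
def Claim_equal_greatXor : Prop := ∀ (num : Int), Dom_greatXor num → Pre_greatXor num → Spec_greatXor num (greatXor num)

-- ===== LEMMAS AND PROOFS =====

-- loop invariant: the loop adds 2^power times the bit-complement of num within its bit length
lemma greatXorLoop_eq (k : Nat) : ∀ (n : Int), n.toNat ≤ k → 0 ≤ n → ∀ (p : Nat) (r : Int),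
    greatXorLoop n p r = r + 2 ^ p * ((2:Int) ^ PySem.Int.bitLength n - 1 - n) := by
  induction k with
  | zero =>
    intro n hk hn p r
    have h0 : n = 0 := by omega
    subst h0
    rw [greatXorLoop]
    simp [PySem.Int.bitLength_zero]
  | succ k ih =>
    intro n hk hn p r
    by_cases h0 : n = 0
    · subst h0; rw [greatXorLoop]; simp [PySem.Int.bitLength_zero]
    · have hpos : 0 < n := by omega
      rw [greatXorLoop]
      rw [if_neg h0, if_neg (by omega)]
      have hshift : n >>> (1:Nat) = n / 2 := by
        rw [Int.shiftRight_eq_div_pow]; norm_num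
      rw [hshift, ih (n / 2) (by omega) (by omega)]
      have hbl : PySem.Int.bitLength n = PySem.Int.bitLength (n / 2) + 1 := by
        rw [PySem.Int.bitLength_of_pos hpos,
            PySem.Int.floordiv_eq_ediv_of_pos (by norm_num : (0:Int) < 2)]
      rw [PySem.Int.band_one, PySem.Int.mod_eq_emod_of_pos (by norm_num : (0:Int) < 2), hbl]
      have h2 : n % 2 = 0 ∨ n % 2 = 1 := Int.emod_two_eq_zero_or_one n
      rcases h2 with h2 | h2
      · rw [if_pos h2]
        generalize PySem.Int.bitLength (n / 2) = m
        generalize hQ : n / 2 = q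
        have hq : n = 2 * q := by omega
        rw [hq, pow_succ, pow_succ]; ring
      · rw [if_neg (by omega)]
        generalize PySem.Int.bitLength (n / 2) = m
        generalize hQ : n / 2 = q
        have hq : n = 2 * q + 1 := by omega
        rw [hq, pow_succ, pow_succ]; ring

-- ===== VERDICT (by name: the statement is the Claim_ definition above) =====
theorem greatXor_spec : Claim_equal_greatXor := by
  intro num _ hpre
  unfold Spec_greatXor greatXor greatXor_alt
  rw [greatXorLoop_eq num.toNat num (le_refl _) hpre 0 0]
  rw [Int.shiftLeft_eq]
  ring
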